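-- pv_equiv track=rewrite | github.com/xianNeuro/helper_functions | xianfunc.py | clean_add_missing
-- ===== SOURCE A (Python) =====
-- def clean_add_missing(inlist):
--     #psiturk recording sometimes miss records the scene label right before a choice point
--     route = inlist
--     insert_where = []
--     insert_what = []
--     for i in range(len(route)):
--         scene = route[i]
--         prior_scene = route[i-1]
--         if scene.find('_')!=-1: #choice point
--             if prior_scene != scene.split('_')[0]:
--                 insert_what.append(scene.split('_')[0])
--                 insert_where.append(i)
--
--     count=len(insert_what)-1
--     for i in sorted(insert_where,reverse=True):
--         route.insert(i,insert_what[count])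
--         count-=1
--     return route
-- ===== SOURCE B (Python) =====
-- def clean_add_missing(inlist):
--     # Single forward pass building a new list: emit the missing scene label
--     # right before a qualifying choice point.  (A mutates inlist in place;
--     # the equivalence is about the return value.)
--     out = []
--     for i, scene in enumerate(inlist):
--         if '_' in scene:
--             label = scene.split('_')[0]
--             if inlist[i - 1] != label:
--                 out.append(label)
--         out.append(scene)
--     return out
-- ===== Notes on version B (the rewrite author's own statement) =====
-- stated objective: alternative
-- what changed: replaces A's collect-positions-then-repeated-list.insert (plus a sort of the positions) with a single forward pass that emits the missing label directly before each qualifying element into a fresh output list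
import Mathlib
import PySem

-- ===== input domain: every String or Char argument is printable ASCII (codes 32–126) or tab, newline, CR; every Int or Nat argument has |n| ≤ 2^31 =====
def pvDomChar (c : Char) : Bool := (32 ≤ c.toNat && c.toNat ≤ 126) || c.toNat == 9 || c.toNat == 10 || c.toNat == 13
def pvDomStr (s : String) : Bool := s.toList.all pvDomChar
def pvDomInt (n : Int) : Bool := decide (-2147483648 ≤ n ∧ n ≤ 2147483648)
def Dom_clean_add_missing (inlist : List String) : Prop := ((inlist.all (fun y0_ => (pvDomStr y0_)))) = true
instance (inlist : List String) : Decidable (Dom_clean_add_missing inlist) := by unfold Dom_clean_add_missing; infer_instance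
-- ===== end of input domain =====

-- B replaces A's collect-then-repeated-insert by one forward pass emitting the
-- missing label before each qualifying element (A mutates inlist; return values are equal).

-- ===== PORT A =====
-- body of A's first loop (records where/what to insert)
def pvStepA1 (route : List String) (st : List Int × List String) (i : Int) : List Int × List String :=
  let scene := PySem.List.pyGetD route i ""
  let prior_scene := PySem.List.pyGetD route (i - 1) ""
  if PySem.Str.find scene "_" ≠ -1 then
    if prior_scene ≠ ((PySem.Str.split? scene "_").getD []).headD "" then
      (st.1 ++ [i], st.2 ++ [((PySem.Str.split? scene "_").getD []).headD ""])
    else st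
  else st

-- body of A's second loop (route.insert(i, insert_what[count]); count -= 1)
def pvStepA2 (insert_what : List String) (st : List String × Int) (i : Int) : List String × Int :=
  (PySem.List.insert st.1 i (PySem.List.pyGetD insert_what st.2 ""), st.2 - 1)

def clean_add_missing (inlist : List String) : List String :=
  let route := inlist
  let st := (PySem.List.pyRange 0 (route.length : Int) 1).foldl (pvStepA1 route) ([], [])
  let insert_where := st.1
  let insert_what := st.2
  ((PySem.List.sorted insert_where (fun x => x) true).foldl (pvStepA2 insert_what)
      (route, (insert_what.length : Int) - 1)).1

-- ===== PORT B =====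
-- body of B's single pass
def pvStepB (inlist : List String) (out : List String) (p : Int × String) : List String :=
  if PySem.Str.isIn "_" p.2 then
    let label := ((PySem.Str.split? p.2 "_").getD []).headD ""
    if PySem.List.pyGetD inlist (p.1 - 1) "" ≠ label then out ++ [label, p.2]
    else out ++ [p.2]
  else out ++ [p.2]

def clean_add_missing_alt (inlist : List String) : List String :=
  (PySem.List.enumerate inlist 0).foldl (pvStepB inlist) []

-- ===== PRECONDITION & SPEC =====
def Spec_clean_add_missing (inlist : List String) (out : List String) : Prop := out = clean_add_missing_alt inlist
instance (inlist : List String) (out : List String) : Decidable (Spec_clean_add_missing inlist out) := by unfold Spec_clean_add_missing; infer_instance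

-- ===== CLAIM (what is proved, stated in full; the proofs are below) =====
def Claim_equal_clean_add_missing : Prop := ∀ (inlist : List String), Dom_clean_add_missing inlist → Spec_clean_add_missing inlist (clean_add_missing inlist)

-- ===== LEMMAS AND PROOFS =====

-- the label inserted before a choice point
def pvLab (s : String) : String := ((PySem.Str.split? s "_").getD []).headD ""

-- what A's first loop records at index i, as an Option
def pvPick (route : List String) (i : Int) : Option (Int × String) :=
  let scene := PySem.List.pyGetD route i ""
  if PySem.Str.find scene "_" ≠ -1 then
    if PySem.List.pyGetD route (i - 1) "" ≠ pvLab scene then some (i, pvLab scene)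
    else none
  else none

-- the chunk B emits for one enumerated element
def pvG (inlist : List String) (p : Int × String) : List String :=
  if PySem.Str.isIn "_" p.2 then
    if PySem.List.pyGetD inlist (p.1 - 1) "" ≠ pvLab p.2 then [pvLab p.2, p.2] else [p.2]
  else [p.2]

lemma stepA1_pick (route : List String) (st : List Int × List String) (i : Int) :
    pvStepA1 route st i = match pvPick route i with
      | some p => (st.1 ++ [p.1], st.2 ++ [p.2])
      | none => st := by
  rw [pvStepA1, pvPick]
  simp only [pvLab]
  split_ifs <;> rfl

lemma stepB_chunk (inlist : List String) (out : List String) (p : Int × String) :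
    pvStepB inlist out p = out ++ pvG inlist p := by
  rw [pvStepB, pvG]
  simp only [pvLab]
  split_ifs <;> rfl

lemma loop1_eq (route : List String) : ∀ (L : List Int) (w : List Int) (h : List String),
    L.foldl (pvStepA1 route) (w, h)
      = (w ++ (L.filterMap (pvPick route)).map Prod.fst,
         h ++ (L.filterMap (pvPick route)).map Prod.snd) := by
  intro L
  induction L with
  | nil => simp
  | cons i L ih =>
    intro w h
    rw [List.foldl_cons, List.filterMap_cons, stepA1_pick]
    cases hp : pvPick route i with
    | none => rw [ih]
    | some p => rw [ih]; simp

lemma loopB_eq (inlist : List String) : ∀ (L : List (Int × String)) (out : List String),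
    L.foldl (pvStepB inlist) out = out ++ L.flatMap (pvG inlist) := by
  intro L
  induction L with
  | nil => simp
  | cons p L ih =>
    intro out
    rw [List.foldl_cons, List.flatMap_cons, stepB_chunk, ih, List.append_assoc]

lemma loop2_eq (what : List String) : ∀ (qs : List (Int × String)) (r : List String),
    (∀ k, k < qs.length → PySem.List.pyGetD what (k : Int) "" = (qs.map Prod.snd).getD k "") →
    ((qs.map Prod.fst).reverse).foldl (pvStepA2 what) (r, (qs.length : Int) - 1)
      = (qs.foldr (fun p r => PySem.List.insert r p.1 p.2) r, -1) := by
  intro qs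
  induction qs using List.reverseRecOn with
  | nil => intro r _; simp
  | append_singleton qs q ih =>
    intro r hw
    have hlen : ((qs ++ [q]).length : Int) - 1 = (qs.length : Int) := by simp
    have hq2 : PySem.List.pyGetD what (qs.length : Int) "" = q.2 := by
      have := hw qs.length (by simp)
      simpa using this
    rw [List.map_append, List.reverse_append, hlen]
    simp only [List.map_cons, List.map_nil, List.reverse_singleton, List.singleton_append,
      List.foldl_cons]
    rw [pvStepA2]
    simp only [hq2]
    have hw' : ∀ k, k < qs.length → PySem.List.pyGetD what (k : Int) "" = (qs.map Prod.snd).getD k "" := by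
      intro k hk
      have := hw k (by simp; omega)
      rwa [List.map_append, List.getD_append _ _ _ _ (by simpa using hk)] at this
    rw [ih (PySem.List.insert r q.1 q.2) hw', List.foldr_append]
    simp

lemma main_eq (inlist : List String) : ∀ (d j : Nat), j + d = inlist.length →
    (((PySem.List.pyRange (j : Int) (inlist.length : Int) 1).filterMap (pvPick inlist)).foldr
        (fun p r => PySem.List.insert r p.1 p.2) inlist)
      = inlist.take j ++ (PySem.List.enumerate (inlist.drop j) (j : Int)).flatMap (pvG inlist) := by
  intro d
  induction d with
  | zero =>
    intro j hj
    rw [PySem.List.pyRange_one_eq_nil (by omega)]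
    have : inlist.drop j = [] := by
      apply List.drop_eq_nil_of_le; omega
    rw [this]
    simp [List.take_of_length_le (by omega : inlist.length ≤ j)]
  | succ d ih =>
    intro j hj
    have hjn : j < inlist.length := by omega
    rw [PySem.List.pyRange_one_cons (by exact_mod_cast hjn)]
    have hscene : PySem.List.pyGetD inlist (j : Int) "" = inlist[j] := by
      rw [PySem.List.pyGetD_natCast]
      exact List.getD_eq_getElem _ _ hjn
    have hcast : (j : Int) + 1 = ((j + 1 : Nat) : Int) := by push_cast; ring
    have hrec := ih (j + 1) (by omega)
    rw [hcast]
    have hdrop : inlist.drop j = inlist[j] :: inlist.drop (j + 1) := List.drop_eq_getElem_cons hjn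
    have htake : inlist.take (j + 1) = inlist.take j ++ [inlist[j]] := by
      rw [List.take_add_one, List.getElem?_eq_getElem hjn]; rfl
    have hfind : PySem.Str.isIn "_" (inlist[j]) = true ↔ PySem.Str.find (inlist[j]) "_" ≠ -1 := by
      rw [PySem.Str.isIn_iff_infix, ← PySem.Str.find_ne_neg_one_iff]
    rw [hdrop, PySem.List.enumerate_cons, List.flatMap_cons]
    cases hp : pvPick inlist ((j : Int)) with
    | none =>
      have hg : pvG inlist ((j : Int), inlist[j]) = [inlist[j]] := by
        rw [pvPick] at hp
        simp only [hscene] at hp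
        rw [pvG]
        by_cases h1 : PySem.Str.find (inlist[j]) "_" ≠ -1
        · rw [if_pos h1] at hp
          by_cases h2 : PySem.List.pyGetD inlist ((j : Int) - 1) "" ≠ pvLab (inlist[j])
          · rw [if_pos h2] at hp; exact absurd hp (by simp)
          · rw [if_pos (hfind.mpr h1), if_neg (by simpa using h2)]
        · rw [if_neg (fun hc => h1 (hfind.mp hc))]
      simp only [List.filterMap_cons, hp]
      rw [hrec, hg, ← hcast, htake]
      simp only [List.append_assoc, List.singleton_append]
    | some p =>
      have hp' : p = ((j : Int), pvLab (inlist[j])) ∧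
          PySem.Str.find (inlist[j]) "_" ≠ -1 ∧
          PySem.List.pyGetD inlist ((j : Int) - 1) "" ≠ pvLab (inlist[j]) := by
        rw [pvPick] at hp
        simp only [hscene] at hp
        by_cases h1 : PySem.Str.find (inlist[j]) "_" ≠ -1
        · rw [if_pos h1] at hp
          by_cases h2 : PySem.List.pyGetD inlist ((j : Int) - 1) "" ≠ pvLab (inlist[j])
          · rw [if_pos h2] at hp
            exact ⟨(Option.some_inj.mp hp).symm, h1, h2⟩
          · rw [if_neg h2] at hp; exact absurd hp (by simp)
        · rw [if_neg h1] at hp; exact absurd hp (by simp)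
      obtain ⟨hpe, h1, h2⟩ := hp'
      subst hpe
      have hg : pvG inlist ((j : Int), inlist[j]) = [pvLab (inlist[j]), inlist[j]] := by
        rw [pvG, if_pos (hfind.mpr h1), if_pos h2]
      simp only [List.filterMap_cons, hp, List.foldr_cons]
      rw [hrec, hg, ← hcast]
      have hlen : j ≤ (inlist.take (j + 1) ++
          (PySem.List.enumerate (inlist.drop (j + 1)) ((j : Int) + 1)).flatMap (pvG inlist)).length := by
        simp only [List.length_append, List.length_take]
        omega
      rw [PySem.List.insert_natCast _ j _ hlen]
      rw [List.take_append, List.drop_append]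
      have h1' : (inlist.take (j + 1)).length = j + 1 := by
        simp [min_eq_left (by omega : j + 1 ≤ inlist.length)]
      rw [h1']
      have hz : j - (j + 1) = 0 := by omega
      rw [hz]
      rw [List.take_take, min_eq_left (by omega : j ≤ j + 1)]
      rw [htake]
      have hdj : (inlist.take j ++ [inlist[j]]).drop j = [inlist[j]] := by
        rw [List.drop_append]
        simp [min_eq_left (by omega : j ≤ inlist.length)]
      rw [hdj]
      simp only [List.take_zero, List.drop_zero, List.append_assoc, List.cons_append, List.nil_append]

lemma fst_filterMap_pick_sublist (inlist : List String) :
    ∀ L : List Int, ((L.filterMap (pvPick inlist)).map Prod.fst).Sublist L := by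
  intro L
  induction L with
  | nil => simp
  | cons i L ih =>
    rw [List.filterMap_cons]
    cases hp : pvPick inlist i with
    | none => exact ih.cons i
    | some p =>
      have hpi : p.1 = i := by
        rw [pvPick] at hp
        split_ifs at hp
        have := Option.some_inj.mp hp
        rw [← this]
      rw [List.map_cons, hpi]
      exact ih.cons₂ i

-- ===== VERDICT (by name: the statement is the Claim_ definition above) =====
theorem clean_add_missing_spec : Claim_equal_clean_add_missing := by
  intro inlist _
  show clean_add_missing inlist = clean_add_missing_alt inlist
  simp only [clean_add_missing, clean_add_missing_alt]
  rw [loop1_eq]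
  simp only [List.nil_append]
  have hpw : (((PySem.List.pyRange 0 (inlist.length : Int) 1).filterMap (pvPick inlist)).map Prod.fst).Pairwise (· < ·) :=
    List.Pairwise.sublist (fst_filterMap_pick_sublist inlist _) (PySem.List.pairwise_lt_pyRange_one 0 (inlist.length : Int))
  have hsorted : PySem.List.sorted (((PySem.List.pyRange 0 (inlist.length : Int) 1).filterMap (pvPick inlist)).map Prod.fst) (fun x => x) true
      = (((PySem.List.pyRange 0 (inlist.length : Int) 1).filterMap (pvPick inlist)).map Prod.fst).reverse :=
    by
      refine PySem.List.sorted_rev_eq_of_perm_of_pairwise_gt _ _ _ (List.reverse_perm _) ?_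
      rw [List.pairwise_reverse]
      exact hpw.imp (fun h => h)
  rw [hsorted, List.length_map]
  rw [loop2_eq _ _ inlist (fun k hk => by rw [PySem.List.pyGetD_natCast])]
  rw [loopB_eq]
  have hmain := main_eq inlist inlist.length 0 (by omega)
  simp only [Nat.cast_zero, List.take_zero, List.drop_zero, List.nil_append] at hmain
  rw [hmain]
  simp
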